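-- pv_equiv track=rewrite | github.com/jplag/JPlag | .github/workflows/scripts/checkHelpText.py | getAllCodeSections
-- ===== SOURCE A (Python) =====
-- def getAllCodeSections(text):
--     codeSections = []
--     currentSection = None
--
--     for line in text:
--         if line.startswith("```"):
--             if currentSection is not None:
--                 codeSections.append(currentSection)
--                 currentSection = None
--             else:
--                 currentSection = []
--         else:
--             if currentSection is not None:
--                 currentSection.append(line)
--
--     if currentSection is not None:
--         codeSections.append(currentSection)
--
--     return codeSections
-- ===== SOURCE B (Python) =====
-- def _isMarker(line):
--     return line.startswith("```")
--
--
-- def getAllCodeSections(text):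
--     # Marker-scan decomposition: find each opening ``` line, then scan
--     # ahead to its closing marker (or end of input) and slice the section out.
--     lines = list(text)
--     n = len(lines)
--     sections = []
--     i = 0
--     while i < n:
--         if _isMarker(lines[i]):
--             j = i + 1
--             while j < n and not _isMarker(lines[j]):
--                 j += 1
--             sections.append(lines[i + 1:j])
--             i = j + 1
--         else:
--             i += 1
--     return sections
-- ===== Notes on version B (the rewrite author's own statement) =====
-- stated objective: alternative
-- what changed: Replaced A's toggle-state single pass (Optional current-section accumulator appended line by line) with a marker-scan: find each opening ``` line, scan forward to its closing marker (or end), and slice the section out in one step.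
import Mathlib
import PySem

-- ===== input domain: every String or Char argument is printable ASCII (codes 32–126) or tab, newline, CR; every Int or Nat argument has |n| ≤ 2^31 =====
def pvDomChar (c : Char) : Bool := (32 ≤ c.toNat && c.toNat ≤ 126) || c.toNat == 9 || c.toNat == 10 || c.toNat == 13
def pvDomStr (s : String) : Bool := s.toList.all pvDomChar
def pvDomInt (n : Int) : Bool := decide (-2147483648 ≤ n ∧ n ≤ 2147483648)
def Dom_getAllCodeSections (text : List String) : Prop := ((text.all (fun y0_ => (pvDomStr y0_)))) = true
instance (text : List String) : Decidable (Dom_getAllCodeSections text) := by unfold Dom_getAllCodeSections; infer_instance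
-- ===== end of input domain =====

-- B replaces A's toggle-state single pass by a marker-scan (find opener, scan to closer, slice); alternative decomposition, same cost.

-- ===== PORT A =====
-- A's loop: state = (codeSections, currentSection : Option), toggled by ``` lines.
def pvAGo (text : List String) (acc : List (List String)) (cur : Option (List String)) :
    List (List String) :=
  match text with
  | [] =>
    match cur with
    | none => acc
    | some c => acc ++ [c]
  | line :: rest =>
    if PySem.Str.startswith line "```" then
      match cur with
      | some c => pvAGo rest (acc ++ [c]) none
      | none => pvAGo rest acc (some [])
    else
      match cur with
      | some c => pvAGo rest acc (some (c ++ [line]))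
      | none => pvAGo rest acc none

def getAllCodeSections (text : List String) : List (List String) :=
  pvAGo text [] none

-- ===== PORT B =====
def pvIsMarker (line : String) : Bool := PySem.Str.startswith line "```"

-- B's outer while loop: skip to the next marker; the inner while loop is the
-- takeWhile/dropWhile scan to the closing marker, then slice and continue after it.
def pvBGo : List String → List (List String)
  | [] => []
  | line :: rest =>
    if pvIsMarker line then
      (rest.takeWhile (fun x => !pvIsMarker x)) ::
        pvBGo ((rest.dropWhile (fun x => !pvIsMarker x)).drop 1)
    else pvBGo rest
termination_by l => l.length
decreasing_by
  · have h := List.length_dropWhile_le (p := fun x => !pvIsMarker x) (l := rest)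
    have h2 := List.length_drop (l := rest.dropWhile (fun x => !pvIsMarker x)) (i := 1)
    simp; omega
  · simp

def getAllCodeSections_alt (text : List String) : List (List String) :=
  pvBGo text

-- ===== PRECONDITION & SPEC =====
def Spec_getAllCodeSections (text : List String) (out : List (List String)) : Prop := out = getAllCodeSections_alt text
instance (text : List String) (out : List (List String)) : Decidable (Spec_getAllCodeSections text out) := by unfold Spec_getAllCodeSections; infer_instance

-- ===== CLAIM (what is proved, stated in full; the proofs are below) =====
def Claim_equal_getAllCodeSections : Prop := ∀ (text : List String), Dom_getAllCodeSections text → Spec_getAllCodeSections text (getAllCodeSections text)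

-- ===== LEMMAS AND PROOFS =====

-- Joint invariant for A's toggle loop, expressed against B's marker-scan:
-- with no open section A contributes acc ++ pvBGo text; with open section c it
-- closes c with the lines up to the next marker and continues after it.
theorem pvAGo_eq (text : List String) :
    (∀ acc, pvAGo text acc none = acc ++ pvBGo text) ∧
    (∀ acc c, pvAGo text acc (some c) =
      acc ++ (c ++ text.takeWhile (fun x => !pvIsMarker x)) ::
        pvBGo ((text.dropWhile (fun x => !pvIsMarker x)).drop 1)) := by
  induction text with
  | nil =>
    constructor
    · intro acc; simp [pvAGo, pvBGo]
    · intro acc c; simp [pvAGo, pvBGo]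
  | cons line rest ih =>
    obtain ⟨ih1, ih2⟩ := ih
    constructor
    · intro acc
      by_cases h : PySem.Chars.startswith line.toList ['`', '`', '`'] = true
      · simp [pvAGo, pvBGo, pvIsMarker, h, ih2]
      · simp [pvAGo, pvBGo, pvIsMarker, h, ih1]
    · intro acc c
      by_cases h : PySem.Chars.startswith line.toList ['`', '`', '`'] = true
      · simp [pvAGo, pvIsMarker, h, ih1, List.takeWhile, List.dropWhile]
      · simp [pvAGo, pvIsMarker, h, ih2, List.takeWhile, List.dropWhile]

-- ===== VERDICT (by name: the statement is the Claim_ definition above) =====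
theorem getAllCodeSections_spec : Claim_equal_getAllCodeSections := by
  intro text _
  unfold Spec_getAllCodeSections getAllCodeSections getAllCodeSections_alt
  simpa using (pvAGo_eq text).1 []
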